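-- pv_equiv track=rewrite | github.com/davijit868/Programming-Solutions | Algorithms/String Algorithms/Maximize the palindromic substrings.py | Solve
-- ===== SOURCE A (Python) =====
-- def Solve(SL,PL,S,P):
--     P_dict = {}
--     for i in P:
--         if i not in P_dict:
--             P_dict[i] = 1
--         else:
--             P_dict[i] += 1
--     S_dict = {}
--     for i in P_dict.keys():
--         S_dict[i] = S.count(i)
--     i = 1
--     flag = False
--     while True:
--         for key,value in P_dict.items():
--             if S_dict[key] < i * P_dict[key]:
--                 flag = True
--                 break
--         if flag:
--             return i-1
--         else:
--             i += 1
-- ===== SOURCE B (Python) =====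
-- def Solve(SL, PL, S, P):
--     return min(S.count(c) // P.count(c) for c in set(P))
-- ===== Notes on version B (the rewrite author's own statement) =====
-- stated objective: faster
-- what changed: Replaces A's incremental while-loop that re-checks every P-character multiplicity for i = 1, 2, ... until one fails (after building two count dicts) with the closed form min(S.count(c) // P.count(c) over the distinct characters of P).
import Mathlib
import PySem

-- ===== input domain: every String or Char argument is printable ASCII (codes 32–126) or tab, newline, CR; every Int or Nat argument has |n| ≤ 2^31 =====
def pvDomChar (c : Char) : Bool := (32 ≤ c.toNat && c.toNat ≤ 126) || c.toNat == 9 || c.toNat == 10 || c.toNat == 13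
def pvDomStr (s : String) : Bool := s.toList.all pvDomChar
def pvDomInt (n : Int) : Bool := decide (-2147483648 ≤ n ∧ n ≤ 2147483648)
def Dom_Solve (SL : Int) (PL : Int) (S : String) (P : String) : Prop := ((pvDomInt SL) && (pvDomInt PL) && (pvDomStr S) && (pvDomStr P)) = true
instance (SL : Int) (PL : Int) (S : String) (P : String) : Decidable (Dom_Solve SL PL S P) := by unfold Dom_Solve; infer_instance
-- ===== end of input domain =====

-- B replaces A's incremental while-loop (re-checking every P-character multiplicity for
-- i = 1, 2, ... until one fails) by the closed form min over P's distinct characters of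
-- floordiv(S.count c, countP c); measured faster.


-- ===== PORT A =====
-- A's while-loop: try i = 1, 2, …; if some key fails S_dict[key] < i * P_dict[key], return i-1.
-- The fuel argument only makes the loop total; under Pre_ the loop exits before fuel runs out.
def SolveLoop (Pd Sd : PySem.Dict Char Int) (i : Int) : Nat → Int
  | 0 => i - 1
  | fuel+1 =>
    if Pd.items.any (fun kv => decide (Sd.getD kv.1 0 < i * kv.2)) then i - 1
    else SolveLoop Pd Sd (i + 1) fuel

def Solve (SL : Int) (PL : Int) (S : String) (P : String) : Int :=
  let Pd := P.toList.foldl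
    (fun d c => if d.contains c = false then d.insert c 1 else d.insert c (d.getD c 0 + 1))
    PySem.Dict.empty
  let Sd := Pd.keys.foldl
    (fun d c => d.insert c ((PySem.Str.count S (String.ofList [c]) : Int))) PySem.Dict.empty
  SolveLoop Pd Sd 1 (S.toList.length + 2)

-- ===== PORT B =====
def Solve_alt (SL : Int) (PL : Int) (S : String) (P : String) : Int :=
  ((PySem.List.min? ((PySem.Set.ofList P.toList).map (fun c =>
      PySem.Int.floordiv ((PySem.Str.count S (String.ofList [c]) : Int))
        ((PySem.Str.count P (String.ofList [c]) : Int)))) (fun x => x)).getD 0)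

-- ===== PRECONDITION & SPEC =====
-- On P = "" A's while-loop never terminates (and B's min() raises ValueError): excluded.
def Pre_Solve (SL : Int) (PL : Int) (S : String) (P : String) : Prop := P ≠ ""
instance (SL : Int) (PL : Int) (S : String) (P : String) : Decidable (Pre_Solve SL PL S P) := by
  unfold Pre_Solve; infer_instance
def pvWitness_Solve : Int × Int × String × String := (5, 2, "ababa", "ab")

def Spec_Solve (SL : Int) (PL : Int) (S : String) (P : String) (out : Int) : Prop := out = Solve_alt SL PL S P
instance (SL : Int) (PL : Int) (S : String) (P : String) (out : Int) : Decidable (Spec_Solve SL PL S P out) := by unfold Spec_Solve; infer_instance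

-- ===== CLAIM (what is proved, stated in full; the proofs are below) =====
def Claim_equal_Solve : Prop := ∀ (SL : Int) (PL : Int) (S : String) (P : String), Dom_Solve SL PL S P → Pre_Solve SL PL S P → Spec_Solve SL PL S P (Solve SL PL S P)

-- ===== LEMMAS AND PROOFS =====

-- s.count(c) for a single character is the plain character count
theorem chars_count_singleton (cs : List Char) (c : Char) :
    PySem.Chars.count cs [c] = cs.count c := by
  have go : ∀ (s : List Char) (fuel acc : Nat), s.length ≤ fuel →
      PySem.Chars.count.go [c] fuel s acc = acc + s.count c := by
    intro s
    induction s with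
    | nil => intro fuel acc _; cases fuel <;> simp [PySem.Chars.count.go]
    | cons h t ih =>
      intro fuel acc hf
      cases fuel with
      | zero => simp at hf
      | succ fuel =>
        have hstep : PySem.Chars.count.go [c] (fuel+1) (h::t) acc
            = if c = h then PySem.Chars.count.go [c] fuel t (acc+1)
              else PySem.Chars.count.go [c] fuel t acc := by
          by_cases hc : c = h
          · subst hc; simp [PySem.Chars.count.go, List.isPrefixOf]
          · simp [PySem.Chars.count.go, List.isPrefixOf, hc]
        rw [hstep]
        by_cases hc : c = h
        · subst hc
          rw [if_pos rfl, ih fuel (acc+1) (by simp at hf; omega)]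
          simp [List.count_cons]; omega
        · rw [if_neg hc, ih fuel acc (by simp at hf; omega)]
          simp [List.count_cons, hc, eq_comm]
  unfold PySem.Chars.count
  simp only [List.isEmpty_cons, if_neg (by decide : ¬ False = true)]
  simpa using go cs cs.length 0 le_rfl

-- A's dict-building step is exactly Counter's step
theorem stepA_eq_counter_step :
    (fun (d : PySem.Dict Char Int) c =>
      if d.contains c = false then d.insert c 1 else d.insert c (d.getD c 0 + 1))
    = (fun (d : PySem.Dict Char Int) c => d.modify c 0 (· + 1)) := by
  funext d c
  by_cases h : d.contains c = false
  · rw [if_pos h, PySem.Dict.modify, PySem.Dict.getD_of_not_contains (h := h)]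
    norm_num
  · rw [if_neg h, PySem.Dict.modify]

-- the A-side S_dict lookup, on keys of the P-counter
theorem Sd_getD (S : String) (l : List Char) (c : Char) (hc : c ∈ PySem.Set.ofList l) :
    ((PySem.Set.ofList l).foldl
      (fun d k => d.insert k ((PySem.Str.count S (String.ofList [k]) : Int))) PySem.Dict.empty).getD c 0
    = (S.toList.count c : Int) := by
  have hnd : (PySem.Set.ofList l).Nodup := PySem.Set.nodup_ofList l
  have hitems := PySem.Dict.items_foldl_insert_fresh
    (l := PySem.Set.ofList l)
    (k := fun k => k)
    (v := fun k => ((PySem.Str.count S (String.ofList [k]) : Int)))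
    (d := PySem.Dict.empty)
    (by intro a _; simp [pysem]) (by simpa using hnd)
  have hmem : (c, ((PySem.Str.count S (String.ofList [c]) : Int))) ∈
      ((PySem.Set.ofList l).foldl
        (fun d k => d.insert k ((PySem.Str.count S (String.ofList [k]) : Int))) PySem.Dict.empty).items := by
    rw [hitems]
    exact List.mem_append_right _ (List.mem_map.mpr ⟨c, hc, rfl⟩)
  have hndk : ((PySem.Set.ofList l).foldl
        (fun d k => d.insert k ((PySem.Str.count S (String.ofList [k]) : Int))) PySem.Dict.empty).keys.Nodup :=
    PySem.Dict.nodup_keys_foldl_insert _ _ _ (by simp [pysem])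
  rw [PySem.Dict.getD_of_mem_items _ hmem hndk 0]
  have : PySem.Str.count S (String.ofList [c]) = S.toList.count c := by
    rw [PySem.Str.count_eq]
    have h1 : (String.ofList [c]).toList = [c] := by simp
    rw [h1, chars_count_singleton]
  rw [this]

-- the loop computes m once the exit test is "m < i"
theorem loop_eq (Pd Sd : PySem.Dict Char Int) (m : Int)
    (hm : ∀ i : Int, (Pd.items.any (fun kv => decide (Sd.getD kv.1 0 < i * kv.2))) = true ↔ m < i) :
    ∀ (fuel : Nat) (i : Int), i ≤ m + 1 → (m + 1 - i).toNat < fuel →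
      SolveLoop Pd Sd i fuel = m := by
  intro fuel
  induction fuel with
  | zero => intro i _ h; omega
  | succ fuel ih =>
    intro i hi hf
    simp only [SolveLoop]
    by_cases hc : (Pd.items.any (fun kv => decide (Sd.getD kv.1 0 < i * kv.2))) = true
    · rw [if_pos hc]
      have := (hm i).mp hc
      omega
    · rw [if_neg hc]
      have : ¬ m < i := fun h => hc ((hm i).mpr h)
      exact ih (i + 1) (by omega) (by omega)

-- ===== VERDICT =====
theorem Solve_spec : Claim_equal_Solve := by
  unfold Claim_equal_Solve
  intro SL PL S P _ hP
  unfold Spec_Solve Solve Solve_alt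
  simp only []
  set l := P.toList with hl
  have hlne : l ≠ [] := by
    intro hh
    rw [hl] at hh
    exact hP (by simpa using congrArg String.ofList hh)
  -- both count dicts are Counter P / Counter S
  rw [stepA_eq_counter_step]
  rw [← PySem.Dict.counter_eq_foldl]
  -- the list B minimises over
  set keys := PySem.Set.ofList l with hkeys
  have hcntpos : ∀ c ∈ keys, 0 < (l.count c : Int) := by
    intro c hc
    have : c ∈ l := (PySem.Set.mem_ofList l c).mp (by simpa [hkeys] using hc)
    exact_mod_cast List.count_pos_iff.mpr this
  have hvals : keys.map (fun c =>
      PySem.Int.floordiv ((PySem.Str.count S (String.ofList [c]) : Int))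
        ((PySem.Str.count P (String.ofList [c]) : Int)))
      = keys.map (fun c => PySem.Int.floordiv ((S.toList.count c : Int)) ((l.count c : Int))) := by
    apply List.map_congr_left
    intro c hc
    simp [chars_count_singleton, hl]
  rw [hvals]
  set vals := keys.map (fun c => PySem.Int.floordiv ((S.toList.count c : Int)) ((l.count c : Int)))
    with hvalsdef
  have hkne : keys ≠ [] := by
    cases hll : l with
    | nil => exact absurd hll hlne
    | cons a t =>
      intro h
      have ha : a ∈ keys := by
        rw [hkeys, hll]
        exact (PySem.Set.mem_ofList (a :: t) a).mpr (by simp)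
      rw [h] at ha; simp at ha
  have hvne : vals ≠ [] := by
    rw [hvalsdef]
    simpa using hkne
  obtain ⟨m, hmval⟩ : ∃ m, PySem.List.min? vals (fun x => x) = some m := by
    cases hmin : PySem.List.min? vals (fun x => x) with
    | none => exact absurd ((PySem.List.min?_eq_none_iff _ _).mp hmin) hvne
    | some m => exact ⟨m, rfl⟩
  have hmmem : m ∈ vals := PySem.List.min?_mem hmval
  have hmle : ∀ v ∈ vals, m ≤ v := by
    intro v hv
    simpa using PySem.List.min?_isMin hmval v hv
  -- every value is between 0 and |S|
  have hbounds : ∀ v ∈ vals, 0 ≤ v ∧ v ≤ (S.toList.length : Int) := by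
    intro v hv
    rw [hvalsdef] at hv
    obtain ⟨c, hc, rfl⟩ := List.mem_map.mp hv
    have hpos := hcntpos c hc
    rw [PySem.Int.floordiv_eq_ediv_of_pos hpos]
    constructor
    · exact Int.ediv_nonneg (by positivity) (by omega)
    · calc (S.toList.count c : Int) / (l.count c : Int) ≤ (S.toList.count c : Int) :=
            Int.ediv_le_self _ (by positivity)
        _ ≤ (S.toList.length : Int) := by exact_mod_cast List.count_le_length
  have hm0 : 0 ≤ m := (hbounds m hmmem).1
  have hmS : m ≤ (S.toList.length : Int) := (hbounds m hmmem).2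
  -- the loop's exit test is "m < i"
  have hSd : ∀ c ∈ keys,
      ((PySem.Dict.counter l).keys.foldl
        (fun d k => d.insert k ((PySem.Str.count S (String.ofList [k]) : Int))) PySem.Dict.empty).getD c 0
      = (S.toList.count c : Int) := by
    intro c hc
    rw [PySem.Dict.keys_counter]
    exact Sd_getD S l c (by simpa [hkeys] using hc)
  have hcond : ∀ i : Int,
      ((PySem.Dict.counter l).items.any (fun kv =>
        decide (((PySem.Dict.counter l).keys.foldl
          (fun d k => d.insert k ((PySem.Str.count S (String.ofList [k]) : Int))) PySem.Dict.empty).getD kv.1 0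
          < i * kv.2))) = true ↔ m < i := by
    intro i
    rw [PySem.Dict.items_counter]
    simp only [List.any_map, List.any_eq_true, Function.comp]
    constructor
    · rintro ⟨c, hc, hlt⟩
      have hc' : c ∈ keys := by simpa [hkeys] using hc
      rw [hSd c hc'] at hlt
      simp only [decide_eq_true_eq] at hlt
      have hv : PySem.Int.floordiv ((S.toList.count c : Int)) ((l.count c : Int)) ∈ vals := by
        rw [hvalsdef]; exact List.mem_map.mpr ⟨c, hc', rfl⟩
      have := hmle _ hv
      have hdiv : PySem.Int.floordiv ((S.toList.count c : Int)) ((l.count c : Int)) < i :=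
        (PySem.Int.floordiv_lt_iff_lt_mul (hcntpos c hc')).mpr hlt
      omega
    · intro hlt
      rw [hvalsdef] at hmmem
      obtain ⟨c, hc, hcv⟩ := List.mem_map.mp hmmem
      refine ⟨c, by simpa [hkeys] using hc, ?_⟩
      rw [hSd c hc]
      simp only [decide_eq_true_eq]
      have : PySem.Int.floordiv ((S.toList.count c : Int)) ((l.count c : Int)) < i := by omega
      exact (PySem.Int.floordiv_lt_iff_lt_mul (hcntpos c hc)).mp this
  rw [loop_eq _ _ m hcond (S.toList.length + 2) 1 (by omega) (by omega)]
  rw [hmval]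
  rfl
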